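-- pv_equiv track=rewrite | github.com/Matthew-Hunt/CodingDojoClasswork | python_w3/w3_d1/W3_D2.py | visible_buildings
-- ===== SOURCE A (Python) =====
-- def visible_buildings(buildings):
--     visible = []
--     max_height = 0
--     for height in buildings:
--         if height > max_height:
--             visible.append(height)
--             max_height = height
--     return visible
-- ===== SOURCE B (Python) =====
-- def visible_buildings(buildings):
--     b = list(buildings)
--     return [h for i, h in enumerate(b) if h > max([0] + b[:i])]
-- ===== Notes on version B (the rewrite author's own statement) =====
-- stated objective: idiomatic
-- what changed: Replaces the running-max accumulator loop with a per-index comprehension that recomputes the prefix maximum (seeded with 0) from a slice for each element.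
import Mathlib
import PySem

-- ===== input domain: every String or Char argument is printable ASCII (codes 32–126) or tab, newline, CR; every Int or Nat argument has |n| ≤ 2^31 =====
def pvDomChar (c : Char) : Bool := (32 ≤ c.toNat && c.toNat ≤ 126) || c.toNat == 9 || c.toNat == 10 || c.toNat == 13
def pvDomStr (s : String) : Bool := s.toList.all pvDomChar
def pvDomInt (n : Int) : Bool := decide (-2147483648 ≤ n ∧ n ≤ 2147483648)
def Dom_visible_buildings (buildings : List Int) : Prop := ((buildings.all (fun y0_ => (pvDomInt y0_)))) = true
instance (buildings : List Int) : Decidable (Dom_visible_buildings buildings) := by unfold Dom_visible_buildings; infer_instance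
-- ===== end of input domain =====

-- B replaces A's running-max accumulator loop by a per-index prefix-max comprehension (idiomatic rewrite, not faster).

-- ===== PORT A =====
-- A's loop: state (visible, max_height), append when height > max_height.
def visible_buildings (buildings : List Int) : List Int :=
  (buildings.foldl
    (fun (st : List Int × Int) height =>
      if height > st.2 then (st.1 ++ [height], height) else st)
    (([] : List Int), (0 : Int))).1

-- ===== PORT B =====
-- [h for i, h in enumerate(b) if h > max([0] + b[:i])]; max of the nonempty list [0]+b[:i] is foldl max 0 over b[:i].
def visible_buildings_alt (buildings : List Int) : List Int :=
  (PySem.List.enumerate buildings 0).filterMap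
    (fun p =>
      if p.2 > (PySem.List.slice buildings none (some p.1)).foldl max 0 then some p.2 else none)

-- ===== PRECONDITION & SPEC =====
def Spec_visible_buildings (buildings : List Int) (out : List Int) : Prop := out = visible_buildings_alt buildings
instance (buildings : List Int) (out : List Int) : Decidable (Spec_visible_buildings buildings out) := by unfold Spec_visible_buildings; infer_instance

-- ===== CLAIM (what is proved, stated in full; the proofs are below) =====
def Claim_equal_visible_buildings : Prop := ∀ (buildings : List Int), Dom_visible_buildings buildings → Spec_visible_buildings buildings (visible_buildings buildings)

-- ===== LEMMAS AND PROOFS =====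

/-- Common characterisation: scan with a running max seed. -/
def pvScan (m : Int) : List Int → List Int
  | [] => []
  | h :: t => (if m < h then [h] else []) ++ pvScan (max m h) t

theorem pvA_char (t : List Int) : ∀ (vis : List Int) (m : Int),
    (t.foldl (fun (st : List Int × Int) height =>
      if height > st.2 then (st.1 ++ [height], height) else st) (vis, m)).1
      = vis ++ pvScan m t := by
  induction t with
  | nil => intro vis m; simp [pvScan]
  | cons h t ih =>
    intro vis m
    by_cases hc : m < h
    · have : max m h = h := by omega
      simp [pvScan, hc, List.foldl, ih, this]
    · have : max m h = m := by omega
      simp [pvScan, hc, List.foldl, ih, this]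

theorem pvB_char (t : List Int) : ∀ (pfx : List Int),
    (PySem.List.enumerate t (pfx.length : Int)).filterMap
      (fun p =>
        if p.2 > (PySem.List.slice (pfx ++ t) none (some p.1)).foldl max 0 then some p.2 else none)
      = pvScan (pfx.foldl max 0) t := by
  induction t with
  | nil => intro pfx; simp [PySem.List.enumerate_nil, pvScan]
  | cons h t ih =>
    intro pfx
    rw [PySem.List.enumerate_cons, List.filterMap_cons]
    have hslice : PySem.List.slice (pfx ++ h :: t) none (some ((pfx.length : Nat) : Int)) = pfx := by
      rw [PySem.List.slice_to_natCast]; simp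
    have htail := ih (pfx ++ [h])
    have hlen : ((pfx ++ [h]).length : Int) = (pfx.length : Int) + 1 := by simp
    rw [hlen] at htail
    have happ : (pfx ++ [h]) ++ t = pfx ++ h :: t := by simp
    rw [happ] at htail
    have hmax : (pfx ++ [h]).foldl max 0 = max (pfx.foldl max 0) h := by
      simp [List.foldl_append]
    rw [hmax] at htail
    by_cases hc : pfx.foldl max 0 < h
    · simp only [hslice, pvScan, htail]
      simp [hc]
    · simp only [hslice, pvScan, htail]
      simp [hc]

-- ===== VERDICT (by name: the statement is the Claim_ definition above) =====
theorem visible_buildings_spec : Claim_equal_visible_buildings := by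
  intro buildings _
  unfold Spec_visible_buildings visible_buildings visible_buildings_alt
  rw [pvA_char]
  have := pvB_char buildings ([] : List Int)
  simpa using this.symm
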